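-- pv_equiv track=rewrite | github.com/git-printa/CarDD | car-damage-ai/ai-service/app/main.py | _permute_three
-- ===== SOURCE A (Python) =====
-- def _permute_three(seed: int) -> list[int]:
--     """Deterministic shuffle of indices 0,1,2."""
--     order = [0, 1, 2]
--     s = seed & 0xFFFFFFFF
--     for i in range(2, 0, -1):
--         j = s % (i + 1)
--         s //= i + 1
--         order[i], order[j] = order[j], order[i]
--     return order
-- ===== SOURCE B (Python) =====
-- _PERMS = (
--     (1, 2, 0), (2, 0, 1), (1, 0, 2),
--     (2, 1, 0), (0, 2, 1), (0, 1, 2),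
-- )
--
-- def _permute_three(seed: int) -> list[int]:
--     """Deterministic shuffle of indices 0,1,2."""
--     return list(_PERMS[(seed & 0xFFFFFFFF) % 6])
-- ===== Notes on version B (the rewrite author's own statement) =====
-- stated objective: simpler
-- what changed: Replaces A's two-iteration Fisher-Yates swap loop with a direct lookup into a precomputed table of the six possible permutations, indexed by the seed's low thirty-two bits modulo six, which fully determines A's result.
import Mathlib
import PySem

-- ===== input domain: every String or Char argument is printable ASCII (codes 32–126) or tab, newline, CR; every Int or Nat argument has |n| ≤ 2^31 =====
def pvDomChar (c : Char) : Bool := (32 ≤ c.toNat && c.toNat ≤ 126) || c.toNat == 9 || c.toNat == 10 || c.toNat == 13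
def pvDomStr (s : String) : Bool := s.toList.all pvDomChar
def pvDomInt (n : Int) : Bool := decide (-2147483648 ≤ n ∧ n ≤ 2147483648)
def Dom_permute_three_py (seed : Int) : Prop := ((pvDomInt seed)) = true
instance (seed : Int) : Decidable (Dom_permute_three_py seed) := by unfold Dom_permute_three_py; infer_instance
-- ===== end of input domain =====

-- B replaces A's Fisher-Yates swap loop by a precomputed table of the six permutations indexed by the seed's low thirty-two bits modulo six (simpler, no loop).

-- ===== PORT A =====
-- seed & 0xFFFFFFFF: the mask is all ones, so this is exactly Python's seed mod 2^32.
def permute_three_py (seed : Int) : List Int :=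
  let order : List Int := [0, 1, 2]
  let s : Int := PySem.Int.mod seed 4294967296
  let st := (PySem.List.pyRange 2 0 (-1)).foldl
    (fun (st : List Int × Int) i =>
      let order := st.1
      let s := st.2
      let j := PySem.Int.mod s (i + 1)
      let s := PySem.Int.floordiv s (i + 1)
      let oi := PySem.List.pyGetD order i 0
      let oj := PySem.List.pyGetD order j 0
      (PySem.List.pySetD (PySem.List.pySetD order i oj) j oi, s))
    (order, s)
  st.1

-- ===== PORT B =====
def pvPERMS : List (List Int) :=
  [[1, 2, 0], [2, 0, 1], [1, 0, 2], [2, 1, 0], [0, 2, 1], [0, 1, 2]]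

def permute_three_py_alt (seed : Int) : List Int :=
  PySem.List.pyGetD pvPERMS (PySem.Int.mod (PySem.Int.mod seed 4294967296) 6) []

-- ===== PRECONDITION & SPEC =====
def Spec_permute_three_py (seed : Int) (out : List Int) : Prop := out = permute_three_py_alt seed
instance (seed : Int) (out : List Int) : Decidable (Spec_permute_three_py seed out) := by unfold Spec_permute_three_py; infer_instance

-- ===== CLAIM (what is proved, stated in full; the proofs are below) =====
def Claim_equal_permute_three_py : Prop := ∀ (seed : Int), Dom_permute_three_py seed → Spec_permute_three_py seed (permute_three_py seed)

-- ===== LEMMAS AND PROOFS =====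
theorem pv_key (s : Int) :
    (let st := (PySem.List.pyRange 2 0 (-1)).foldl
      (fun (st : List Int × Int) i =>
        let order := st.1
        let s := st.2
        let j := PySem.Int.mod s (i + 1)
        let s := PySem.Int.floordiv s (i + 1)
        let oi := PySem.List.pyGetD order i 0
        let oj := PySem.List.pyGetD order j 0
        (PySem.List.pySetD (PySem.List.pySetD order i oj) j oi, s))
      (([0, 1, 2] : List Int), s)
     st.1) = PySem.List.pyGetD pvPERMS (PySem.Int.mod s 6) [] := by
  have hrange : PySem.List.pyRange 2 0 (-1) = [2, 1] := by decide
  rw [hrange]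
  simp only [List.foldl]
  simp only [show ((2:Int)+1)=3 by norm_num, show ((1:Int)+1)=2 by norm_num]
  rw [PySem.Int.mod_eq_emod_of_pos (show (0:Int) < 3 by norm_num),
      PySem.Int.mod_eq_emod_of_pos (show (0:Int) < 6 by norm_num),
      PySem.Int.floordiv_eq_ediv_of_pos (show (0:Int) < 3 by norm_num)]
  have h3 : s % 3 = (s % 6) % 3 := by omega
  have h2 : PySem.Int.mod (s / 3) 2 = (s % 6) / 3 := by
    rw [PySem.Int.mod_eq_emod_of_pos (show (0:Int) < 2 by norm_num)]; omega
  rw [h3, h2]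
  have h6 : s % 6 = 0 ∨ s % 6 = 1 ∨ s % 6 = 2 ∨ s % 6 = 3 ∨ s % 6 = 4 ∨ s % 6 = 5 := by omega
  rcases h6 with h | h | h | h | h | h <;> rw [h] <;> decide

-- ===== VERDICT (by name: the statement is the Claim_ definition above) =====
theorem permute_three_py_spec : Claim_equal_permute_three_py := by
  intro seed _
  unfold Spec_permute_three_py permute_three_py permute_three_py_alt
  exact pv_key (PySem.Int.mod seed 4294967296)
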